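-- pv_equiv track=rewrite | github.com/NeriyaFilber/Intro_Data_Science | Ex2/211377700_2_all_data.py | file_to_list
-- ===== SOURCE A (Python) =====
-- def file_to_list(file_split, iris_name):
--     iris_data = []
--     length_sepal = []
--     width_sepal = []
--     petal_length = []
--     petal_width = []
--     for line in file_split:
--         if iris_name in line[4]:
--             length_sepal.append(line[0])
--             width_sepal.append(line[1])
--             petal_length.append(line[2])
--             petal_width.append(line[3])
--     iris_data.append(length_sepal)
--     iris_data.append(width_sepal)
--     iris_data.append(petal_length)
--     iris_data.append(petal_width)
--     return iris_data
-- ===== SOURCE B (Python) =====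
-- def file_to_list(file_split, iris_name):
--     selected = [line[:4] for line in file_split if iris_name in line[4]]
--     return [list(col) for col in zip(*selected)] or [[], [], [], []]
-- ===== Notes on version B (the rewrite author's own statement) =====
-- stated objective: idiomatic
-- what changed: Replaces the single-pass scatter into four named accumulator lists with a collect-then-transpose decomposition: filter rows, slice the four columns, transpose with zip (empty fallback for no matches).
import Mathlib
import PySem

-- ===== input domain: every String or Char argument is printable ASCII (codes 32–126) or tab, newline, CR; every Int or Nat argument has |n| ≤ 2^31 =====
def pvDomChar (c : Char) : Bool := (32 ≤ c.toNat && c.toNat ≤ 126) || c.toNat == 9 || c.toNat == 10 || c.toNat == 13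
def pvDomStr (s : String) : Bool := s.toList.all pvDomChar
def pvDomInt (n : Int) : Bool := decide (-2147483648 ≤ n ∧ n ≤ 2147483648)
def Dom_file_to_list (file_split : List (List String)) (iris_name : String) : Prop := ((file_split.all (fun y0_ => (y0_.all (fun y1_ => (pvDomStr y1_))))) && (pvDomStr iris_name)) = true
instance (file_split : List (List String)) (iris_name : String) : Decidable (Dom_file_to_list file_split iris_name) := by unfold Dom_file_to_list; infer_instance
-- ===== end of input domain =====

-- B replaces A's single-pass scatter into four named lists by filter + slice + zip-transpose (idiomatic decomposition, same cost).

-- ===== PORT A =====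
-- A's loop appends to four parallel lists; ported as a foldl over a 4-tuple of lists.
-- line[4] / line[i] are ported with pyGetD; Pre_ guarantees the index is in range (Python raises otherwise).
def file_to_list (file_split : List (List String)) (iris_name : String) : List (List String) :=
  let st := file_split.foldl
    (fun (acc : List String × List String × List String × List String) line =>
      if PySem.Str.isIn iris_name (PySem.List.pyGetD line 4 "") then
        (acc.1 ++ [PySem.List.pyGetD line 0 ""],
         acc.2.1 ++ [PySem.List.pyGetD line 1 ""],
         acc.2.2.1 ++ [PySem.List.pyGetD line 2 ""],
         acc.2.2.2 ++ [PySem.List.pyGetD line 3 ""])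
      else acc)
    ([], [], [], [])
  [st.1, st.2.1, st.2.2.1, st.2.2.2]

-- ===== PORT B =====
-- selected = [line[:4] for line in file_split if iris_name in line[4]]
-- return [list(col) for col in zip(*selected)] or [[], [], [], []]
-- zip(*selected) is ported as the i-th-component transpose: rows are line[:4], all of length 4 under Pre_.
def file_to_list_alt (file_split : List (List String)) (iris_name : String) : List (List String) :=
  let selected := (file_split.filter
      (fun line => PySem.Str.isIn iris_name (PySem.List.pyGetD line 4 ""))).map
      (fun line => PySem.List.slice line (some 0) (some 4))
  let cols := if selected.isEmpty then []
              else (List.range 4).map (fun i => selected.map (fun r => r.getD i ""))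
  if cols.isEmpty then [[], [], [], []] else cols

-- ===== PRECONDITION & SPEC =====
-- Pre_ excludes exactly the rows on which Python A raises IndexError at line[4]: rows shorter than 5.
def Pre_file_to_list (file_split : List (List String)) (iris_name : String) : Prop :=
  ∀ line ∈ file_split, 5 ≤ line.length
instance (file_split : List (List String)) (iris_name : String) : Decidable (Pre_file_to_list file_split iris_name) := by unfold Pre_file_to_list; infer_instance

def pvWitness_file_to_list : List (List String) × String :=
  ([["1", "2", "3", "4", "setosa"], ["5", "6", "7", "8", "versicolor"]], "setosa")

def Spec_file_to_list (file_split : List (List String)) (iris_name : String) (out : List (List String)) : Prop := out = file_to_list_alt file_split iris_name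
instance (file_split : List (List String)) (iris_name : String) (out : List (List String)) : Decidable (Spec_file_to_list file_split iris_name out) := by unfold Spec_file_to_list; infer_instance

-- ===== CLAIM (what is proved, stated in full; the proofs are below) =====
def Claim_equal_file_to_list : Prop := ∀ (file_split : List (List String)) (iris_name : String), Dom_file_to_list file_split iris_name → Pre_file_to_list file_split iris_name → Spec_file_to_list file_split iris_name (file_to_list file_split iris_name)

-- ===== LEMMAS AND PROOFS =====

-- A's loop with arbitrary accumulators appends the four filtered columns (abstract predicate/getters)
theorem pvLoopA {p : List String → Bool} {g0 g1 g2 g3 : List String → String}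
    (fs : List (List String)) (a b c d : List String) :
    fs.foldl
      (fun (acc : List String × List String × List String × List String) line =>
        if p line then
          (acc.1 ++ [g0 line], acc.2.1 ++ [g1 line], acc.2.2.1 ++ [g2 line], acc.2.2.2 ++ [g3 line])
        else acc)
      (a, b, c, d)
    = (a ++ (fs.filter p).map g0, b ++ (fs.filter p).map g1,
       c ++ (fs.filter p).map g2, d ++ (fs.filter p).map g3) := by
  induction fs generalizing a b c d with
  | nil => simp
  | cons h t ih =>
    rw [List.foldl_cons, List.filter_cons]
    by_cases hp : p h = true
    · rw [if_pos hp, if_pos hp, ih]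
      simp [List.append_assoc]
    · rw [if_neg hp, if_neg hp, ih]

-- a sliced row read at i < 4 is the original row read at i (rows have length ≥ 5)
theorem pvSliceGet (line : List String) (hlen : 5 ≤ line.length) (i : Nat) (hi : i < 4) :
    (PySem.List.slice line (some 0) (some 4)).getD i "" = PySem.List.pyGetD line (i : Int) "" := by
  have hil : i < line.length := by omega
  simp [PySem.List.slice, PySem.List.clampIdx, List.getD_eq_getElem?_getD,
        hi, hil, PySem.List.pyGetD_natCast]

-- B's transposed column i equals A's collected column i
theorem pvColEq {p : List String → Bool} (fs : List (List String))
    (hpre : ∀ line ∈ fs, 5 ≤ line.length) (i : Nat) (hi : i < 4) :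
    ((fs.filter p).map (fun line => PySem.List.slice line (some 0) (some 4))).map
        (fun r => r.getD i "")
      = (fs.filter p).map (fun line => PySem.List.pyGetD line (i : Int) "") := by
  rw [List.map_map]
  refine List.map_congr_left ?_
  intro line hline
  exact pvSliceGet line (hpre line (List.mem_of_mem_filter hline)) i hi

-- characterization of B under the precondition
theorem pvAltEq (fs : List (List String)) (iris_name : String)
    (hpre : ∀ line ∈ fs, 5 ≤ line.length) :
    file_to_list_alt fs iris_name =
      [(fs.filter (fun line => PySem.Str.isIn iris_name (PySem.List.pyGetD line 4 ""))).map (fun line => PySem.List.pyGetD line 0 ""),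
       (fs.filter (fun line => PySem.Str.isIn iris_name (PySem.List.pyGetD line 4 ""))).map (fun line => PySem.List.pyGetD line 1 ""),
       (fs.filter (fun line => PySem.Str.isIn iris_name (PySem.List.pyGetD line 4 ""))).map (fun line => PySem.List.pyGetD line 2 ""),
       (fs.filter (fun line => PySem.Str.isIn iris_name (PySem.List.pyGetD line 4 ""))).map (fun line => PySem.List.pyGetD line 3 "")] := by
  unfold file_to_list_alt
  set P := fs.filter (fun line => PySem.Str.isIn iris_name (PySem.List.pyGetD line 4 "")) with hP
  by_cases hsel : P = []
  · rw [hsel]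
    simp
  · have hmap : (P.map (fun line => PySem.List.slice line (some 0) (some 4))).isEmpty = false := by
      simp [hsel]
    have hrange : List.range 4 = [0, 1, 2, 3] := by decide
    simp only [hmap, hrange, Bool.false_eq_true, if_false, List.map_cons, List.map_nil,
               List.isEmpty_cons]
    rw [pvColEq fs hpre 0 (by omega), pvColEq fs hpre 1 (by omega),
        pvColEq fs hpre 2 (by omega), pvColEq fs hpre 3 (by omega)]
    rw [hP]
    norm_num

-- ===== VERDICT (by name: the statement is the Claim_ definition above) =====
theorem file_to_list_spec : Claim_equal_file_to_list := by
  intro file_split iris_name _ hpre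
  unfold Spec_file_to_list file_to_list
  rw [pvLoopA, pvAltEq file_split iris_name hpre]
  norm_num
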